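-- pv_equiv track=rewrite | github.com/jasonCgit/uop-api | app/mock_data/situation_room_data.py | _worst_status
-- ===== SOURCE A (Python) =====
-- STATUS_RANK = {"critical": 0, "warning": 1, "healthy": 2, "no_data": 3}
--
-- RANK_STATUS = {v: k for k, v in STATUS_RANK.items()}
--
-- def _worst_status(seals: list[str], enriched_apps: list[dict]) -> str:
--     """Compute worst status across apps matching the given SEALs."""
--     worst = 3  # no_data
--     seal_set = set(seals)
--     for app in enriched_apps:
--         if app.get("seal") in seal_set:
--             rank = STATUS_RANK.get(app.get("status", "no_data"), 3)
--             if rank < worst: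
--                 worst = rank
--     return RANK_STATUS.get(worst, "no_data")
-- ===== SOURCE B (Python) =====
-- STATUS_RANK = {"critical": 0, "warning": 1, "healthy": 2, "no_data": 3}
--
-- RANK_STATUS = {v: k for k, v in STATUS_RANK.items()}
--
-- def _worst_status(seals, enriched_apps):
--     """Compute worst status across apps matching the given SEALs."""
--     seal_set = set(seals)
--     present = {
--         (app.get("status", "no_data")
--          if app.get("status", "no_data") in STATUS_RANK else "no_data")
--         for app in enriched_apps
--         if app.get("seal") in seal_set
--     }
--     for name in ("critical", "warning", "healthy"):
--         if name in present:
--             return name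
--     return "no_data"
-- ===== Notes on version B (the rewrite author's own statement) =====
-- stated objective: alternative
-- what changed: B replaces A's running-minimum rank scan with building the set of normalised statuses of matching apps and then probing the status names in worst-to-best order, returning the first present.
import Mathlib
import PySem

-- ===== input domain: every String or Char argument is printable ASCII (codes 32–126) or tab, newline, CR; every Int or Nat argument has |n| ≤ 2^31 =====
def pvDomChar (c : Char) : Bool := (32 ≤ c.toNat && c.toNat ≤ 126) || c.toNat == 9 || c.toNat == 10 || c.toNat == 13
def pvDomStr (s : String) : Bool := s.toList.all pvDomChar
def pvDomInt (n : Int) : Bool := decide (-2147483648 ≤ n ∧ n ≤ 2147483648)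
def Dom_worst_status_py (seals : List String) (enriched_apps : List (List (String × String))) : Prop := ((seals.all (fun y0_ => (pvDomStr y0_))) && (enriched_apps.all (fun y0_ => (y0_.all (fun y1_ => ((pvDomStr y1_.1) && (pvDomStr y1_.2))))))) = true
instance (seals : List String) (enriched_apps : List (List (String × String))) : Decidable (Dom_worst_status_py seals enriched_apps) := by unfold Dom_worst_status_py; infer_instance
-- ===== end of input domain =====

-- B builds the set of normalised statuses of matching apps and probes status names worst-to-best, instead of A's running-minimum rank scan (alternative decomposition, same cost).


-- ===== PORT A =====
-- STATUS_RANK / RANK_STATUS: the module's literal dicts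
def pvStatusRank : PySem.Dict String Int :=
  PySem.Dict.mk [("critical", 0), ("warning", 1), ("healthy", 2), ("no_data", 3)]

def pvRankStatus : PySem.Dict Int String :=
  PySem.Dict.mk [((0 : Int), "critical"), (1, "warning"), (2, "healthy"), (3, "no_data")]

-- literal port of A: running minimum of status ranks over matching apps
def worst_status_py (seals : List String) (enriched_apps : List (List (String × String))) : String :=
  let seal_set : PySem.Set String := PySem.Set.ofList seals
  let worst : Int := enriched_apps.foldl (fun worst app =>
    if (match PySem.Dict.get? (PySem.Dict.mk app) "seal" with
        | some s => PySem.Set.contains seal_set s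
        | none => false) then
      let rank := PySem.Dict.getD pvStatusRank (PySem.Dict.getD (PySem.Dict.mk app) "status" "no_data") 3
      if rank < worst then rank else worst
    else worst) 3
  PySem.Dict.getD pvRankStatus worst "no_data"

-- ===== PORT B =====
-- app.get("seal") in seal_set
def pvMatches (seal_set : PySem.Set String) (app : List (String × String)) : Bool :=
  match PySem.Dict.get? (PySem.Dict.mk app) "seal" with
  | some s => PySem.Set.contains seal_set s
  | none => false

-- the app's status, folded into "no_data" when missing or not a key of STATUS_RANK
def pvNorm (app : List (String × String)) : String :=
  let st := PySem.Dict.getD (PySem.Dict.mk app) "status" "no_data"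
  if PySem.Dict.contains pvStatusRank st then st else "no_data"

def worst_status_py_alt (seals : List String) (enriched_apps : List (List (String × String))) : String :=
  let seal_set : PySem.Set String := PySem.Set.ofList seals
  let present : PySem.Set String :=
    PySem.Set.ofList ((enriched_apps.filter (pvMatches seal_set)).map pvNorm)
  if PySem.Set.contains present "critical" then "critical"
  else if PySem.Set.contains present "warning" then "warning"
  else if PySem.Set.contains present "healthy" then "healthy"
  else "no_data"

-- ===== PRECONDITION & SPEC =====
def Spec_worst_status_py (seals : List String) (enriched_apps : List (List (String × String))) (out : String) : Prop := out = worst_status_py_alt seals enriched_apps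
instance (seals : List String) (enriched_apps : List (List (String × String))) (out : String) : Decidable (Spec_worst_status_py seals enriched_apps out) := by unfold Spec_worst_status_py; infer_instance

-- ===== CLAIM (what is proved, stated in full; the proofs are below) =====
def Claim_equal_worst_status_py : Prop := ∀ (seals : List String) (enriched_apps : List (List (String × String))), Dom_worst_status_py seals enriched_apps → Spec_worst_status_py seals enriched_apps (worst_status_py seals enriched_apps)

-- ===== LEMMAS AND PROOFS =====

-- f s = STATUS_RANK.get(s, 3)
def pvF (s : String) : Int := PySem.Dict.getD pvStatusRank s 3

lemma pvF_of_not_contains (s : String) (h : PySem.Dict.contains pvStatusRank s = false) :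
    pvF s = 3 := by
  simp [pvStatusRank, PySem.Dict.contains] at h
  have e1 : ("critical" == s) = false := beq_eq_false_iff_ne.mpr h.1
  have e2 : ("warning" == s) = false := beq_eq_false_iff_ne.mpr h.2.1
  have e3 : ("healthy" == s) = false := beq_eq_false_iff_ne.mpr h.2.2.1
  have e4 : ("no_data" == s) = false := beq_eq_false_iff_ne.mpr h.2.2.2
  simp [pvF, pvStatusRank, PySem.Dict.getD, PySem.Dict.get?, List.find?, e1, e2, e3, e4]

lemma pvF_norm (app : List (String × String)) :
    pvF (pvNorm app) =
      PySem.Dict.getD pvStatusRank (PySem.Dict.getD (PySem.Dict.mk app) "status" "no_data") 3 := by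
  unfold pvNorm
  by_cases h : PySem.Dict.contains pvStatusRank
      (PySem.Dict.getD (PySem.Dict.mk app) "status" "no_data") = true
  · simp [h, pvF]
  · simp only [Bool.not_eq_true] at h
    set st := PySem.Dict.getD (PySem.Dict.mk app) "status" "no_data" with hst
    simp only [h, Bool.false_eq_true, if_false]
    rw [show pvStatusRank.getD st 3 = pvF st from rfl, pvF_of_not_contains st h]
    decide

lemma pvNorm_mem (app : List (String × String)) :
    pvNorm app ∈ ["critical", "warning", "healthy", "no_data"] := by
  unfold pvNorm
  set st := PySem.Dict.getD (PySem.Dict.mk app) "status" "no_data" with hst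
  by_cases h : PySem.Dict.contains pvStatusRank st = true
  · simp only [h, if_true]
    simp [pvStatusRank, PySem.Dict.contains] at h
    rcases h with h | h | h | h <;> simp [← h]
  · simp only [Bool.not_eq_true] at h
    simp [h]

-- A's fold over all apps equals a min-fold over the normalised statuses of matching apps
lemma pvFoldA_eq (ss : PySem.Set String) :
    ∀ (apps : List (List (String × String))) (w : Int),
      apps.foldl (fun worst app =>
        if (match PySem.Dict.get? (PySem.Dict.mk app) "seal" with
            | some s => PySem.Set.contains ss s
            | none => false) then
          let rank := PySem.Dict.getD pvStatusRank (PySem.Dict.getD (PySem.Dict.mk app) "status" "no_data") 3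
          if rank < worst then rank else worst
        else worst) w
      = ((apps.filter (pvMatches ss)).map pvNorm).foldl
          (fun w s => if pvF s < w then pvF s else w) w := by
  intro apps
  induction apps with
  | nil => intro w; rfl
  | cons a rest ih =>
    intro w
    by_cases h : pvMatches ss a = true
    · have hg : (match PySem.Dict.get? (PySem.Dict.mk a) "seal" with
        | some s => PySem.Set.contains ss s
        | none => false) = true := h
      simp only [List.foldl_cons, List.filter_cons, h, if_true, List.map_cons,
        List.foldl_cons, hg, ih, pvF_norm]
    · have hg : (match PySem.Dict.get? (PySem.Dict.mk a) "seal" with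
        | some s => PySem.Set.contains ss s
        | none => false) = false := by
        simpa [pvMatches] using h
      simp only [List.foldl_cons, List.filter_cons, h, hg, Bool.false_eq_true,
        if_false, ih]

-- upper-bound characterisation of the min-fold
lemma pvFold_le_iff (k : Int) :
    ∀ (rs : List String) (w : Int),
      (rs.foldl (fun w s => if pvF s < w then pvF s else w) w ≤ k
        ↔ (w ≤ k ∨ ∃ s ∈ rs, pvF s ≤ k)) := by
  intro rs
  induction rs with
  | nil => intro w; simp
  | cons a rest ih =>
    intro w
    rw [List.foldl_cons, ih]
    constructor
    · rintro (h | h)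
      · split_ifs at h with hc
        · exact Or.inr ⟨a, List.mem_cons_self, by omega⟩
        · exact Or.inl h
      · rcases h with ⟨s, hs, h⟩; exact Or.inr ⟨s, List.mem_cons_of_mem _ hs, h⟩
    · rintro (h | ⟨s, hs, h⟩)
      · left; split_ifs <;> omega
      · rcases List.mem_cons.mp hs with rfl | hs
        · left; split_ifs <;> omega
        · exact Or.inr ⟨s, hs, h⟩

-- lower bound: the fold stays nonnegative
lemma pvFold_nonneg :
    ∀ (rs : List String) (w : Int), (∀ s ∈ rs, 0 ≤ pvF s) → 0 ≤ w →
      0 ≤ rs.foldl (fun w s => if pvF s < w then pvF s else w) w := by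
  intro rs
  induction rs with
  | nil => intro w _ hw; simpa using hw
  | cons a rest ih =>
    intro w hall hw
    rw [List.foldl_cons]
    refine ih _ (fun s hs => hall s (List.mem_cons_of_mem _ hs)) ?_
    have := hall a List.mem_cons_self
    split_ifs <;> omega

lemma pvF_val (s : String) (h : s ∈ ["critical", "warning", "healthy", "no_data"]) :
    pvF s = (if s = "critical" then 0 else if s = "warning" then 1 else if s = "healthy" then 2 else 3) := by
  simp only [List.mem_cons] at h
  rcases h with rfl | rfl | rfl | rfl | h
  · decide
  · decide
  · decide
  · decide
  · exact absurd h List.not_mem_nil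

theorem worst_status_py_spec_aux (seals : List String) (enriched_apps : List (List (String × String))) :
    worst_status_py seals enriched_apps = worst_status_py_alt seals enriched_apps := by
  have ss := PySem.Set.ofList seals
  set rs := (enriched_apps.filter (pvMatches (PySem.Set.ofList seals))).map pvNorm with hrs
  have key : worst_status_py seals enriched_apps =
      PySem.Dict.getD pvRankStatus
        (rs.foldl (fun w s => if pvF s < w then pvF s else w) 3) "no_data" :=
    congrArg (fun w => PySem.Dict.getD pvRankStatus w "no_data")
      (pvFoldA_eq (PySem.Set.ofList seals) enriched_apps 3)
  have hB : worst_status_py_alt seals enriched_apps =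
      (if PySem.Set.contains (PySem.Set.ofList rs) "critical" then "critical"
       else if PySem.Set.contains (PySem.Set.ofList rs) "warning" then "warning"
       else if PySem.Set.contains (PySem.Set.ofList rs) "healthy" then "healthy"
       else "no_data") := rfl
  rw [key, hB]
  have hmem : ∀ s ∈ rs, s ∈ ["critical", "warning", "healthy", "no_data"] := by
    intro s hs
    rw [hrs] at hs
    rcases List.mem_map.mp hs with ⟨app, _, rfl⟩
    exact pvNorm_mem app
  have hval : ∀ s ∈ rs, pvF s = (if s = "critical" then 0 else if s = "warning" then 1 else if s = "healthy" then 2 else 3) :=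
    fun s hs => pvF_val s (hmem s hs)
  set r := rs.foldl (fun w s => if pvF s < w then pvF s else w) 3 with hr
  have hnn : 0 ≤ r := pvFold_nonneg rs 3 (fun s hs => by rw [hval s hs]; split_ifs <;> omega) (by omega)
  have hcmem : ∀ (x : String), PySem.Set.contains (PySem.Set.ofList rs) x = true ↔ x ∈ rs := by
    intro x
    rw [PySem.Set.contains, List.contains_iff_mem, PySem.Set.mem_ofList]
  have hle : ∀ k : Int, (r ≤ k ↔ (3 ≤ k ∨ ∃ s ∈ rs, pvF s ≤ k)) := fun k => pvFold_le_iff k rs 3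
  by_cases hC : "critical" ∈ rs
  · have h0 : r ≤ 0 := (hle 0).mpr (Or.inr ⟨"critical", hC, by decide⟩)
    have hr0 : r = 0 := le_antisymm h0 hnn
    rw [hr0]
    simp only [hcmem]
    simp [hC]
    decide
  · by_cases hW : "warning" ∈ rs
    · have h1 : r ≤ 1 := (hle 1).mpr (Or.inr ⟨"warning", hW, by decide⟩)
      have h0 : ¬ r ≤ 0 := by
        rw [hle 0]
        rintro (h | ⟨s, hs, h⟩)
        · omega
        · rw [hval s hs] at h
          split_ifs at h with e1 e2 e3
          · exact hC (e1 ▸ hs)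
          all_goals omega
      have hr1 : r = 1 := by omega
      rw [hr1]
      simp only [hcmem]
      simp [hC, hW]
      decide
    · by_cases hH : "healthy" ∈ rs
      · have h2 : r ≤ 2 := (hle 2).mpr (Or.inr ⟨"healthy", hH, by decide⟩)
        have h1 : ¬ r ≤ 1 := by
          rw [hle 1]
          rintro (h | ⟨s, hs, h⟩)
          · omega
          · rw [hval s hs] at h
            split_ifs at h with e1 e2 e3
            · exact hC (e1 ▸ hs)
            · exact hW (e2 ▸ hs)
            all_goals omega
        have hr2 : r = 2 := by omega
        rw [hr2]
        simp only [hcmem]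
        simp [hC, hW, hH]
        decide
      · have h3 : r ≤ 3 := (hle 3).mpr (Or.inl (by omega))
        have h2 : ¬ r ≤ 2 := by
          rw [hle 2]
          rintro (h | ⟨s, hs, h⟩)
          · omega
          · rw [hval s hs] at h
            split_ifs at h with e1 e2 e3
            · exact hC (e1 ▸ hs)
            · exact hW (e2 ▸ hs)
            · exact hH (e3 ▸ hs)
            · omega
        have hr3 : r = 3 := by omega
        rw [hr3]
        simp only [hcmem]
        simp [hC, hW, hH]
        decide

-- ===== VERDICT (by name: the statement is the Claim_ definition above) =====
theorem worst_status_py_spec : Claim_equal_worst_status_py := by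
  intro seals enriched_apps _
  exact worst_status_py_spec_aux seals enriched_apps
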